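-- pv_equiv track=rewrite | github.com/hardware-fab/osiris | 2_flow/0_alter/0_alter_nf.py | generate_nf_permutations
-- ===== SOURCE A (Python) =====
-- import itertools
--
-- def generate_nf_permutations(groups, nf_values):
--     """
--     Restituisce una lista di dizionari:
--       [
--         { 'M1':2, 'M2':2, 'M3':4, ... },
--         { 'M1':2, 'M2':2, 'M3':6, ... },
--         ...
--       ]
--     """
--     all_perms = []
--     # per ogni assegnazione di nf_values ai gruppi
--     for assignment in itertools.product(nf_values, repeat=len(groups)):
--         mapping = {}
--         for (group, nf) in zip(groups, assignment):
--             for element in group: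
--                 mapping[element] = nf
--         all_perms.append(mapping)
--     return all_perms
-- ===== SOURCE B (Python) =====
-- def generate_nf_permutations(groups, nf_values):
--     """
--     Same result as the itertools.product version, built incrementally:
--     fold over the groups, expanding the list of partial mappings by one
--     group at a time (existing mapping outer, nf value inner), which yields
--     the identical order (first group slowest-varying, last fastest).
--     """
--     result = [{}]
--     for group in groups:
--         new = []
--         for mapping in result:
--             for nf in nf_values:
--                 m = dict(mapping)
--                 for element in group:
--                     m[element] = nf
--                 new.append(m)
--         result = new
--     return result
-- ===== Notes on version B (the rewrite author's own statement) =====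
-- stated objective: alternative
-- what changed: Replaced itertools.product over full assignments (rebuilding every dict from scratch) by a single fold over groups that incrementally expands a list of partial mappings, copying and extending each one per nf value.
import Mathlib
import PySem

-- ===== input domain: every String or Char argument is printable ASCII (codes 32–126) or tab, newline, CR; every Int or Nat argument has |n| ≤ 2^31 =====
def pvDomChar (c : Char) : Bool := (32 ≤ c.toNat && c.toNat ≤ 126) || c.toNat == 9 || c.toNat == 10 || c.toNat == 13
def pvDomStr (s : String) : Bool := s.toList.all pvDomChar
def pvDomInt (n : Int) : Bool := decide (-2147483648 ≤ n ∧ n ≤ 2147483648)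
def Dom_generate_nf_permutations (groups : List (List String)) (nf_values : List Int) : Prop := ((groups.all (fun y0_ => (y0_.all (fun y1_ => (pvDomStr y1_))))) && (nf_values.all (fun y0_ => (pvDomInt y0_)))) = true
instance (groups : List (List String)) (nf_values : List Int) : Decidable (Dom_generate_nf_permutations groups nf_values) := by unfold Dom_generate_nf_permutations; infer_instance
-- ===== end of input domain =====

-- B replaces itertools.product over full assignments by one fold over groups that
-- incrementally expands a list of partial mappings (objective: alternative, same cost).

-- ===== PORT A =====
-- itertools.product(vals, repeat=n): first factor slowest-varying
def pvProductRepeat (vals : List Int) : Nat → List (List Int)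
  | 0 => [[]]
  | n + 1 => vals.flatMap (fun v => (pvProductRepeat vals n).map (fun t => v :: t))

-- mapping = {}; for (group, nf) in zip(groups, assignment): for element in group: mapping[element] = nf
def pvMappingA (groups : List (List String)) (assignment : List Int) : PySem.Dict String Int :=
  (groups.zip assignment).foldl
    (fun m gv => gv.1.foldl (fun m e => m.insert e gv.2) m) PySem.Dict.empty

def generate_nf_permutations (groups : List (List String)) (nf_values : List Int) : List (List (String × Int)) :=
  (pvProductRepeat nf_values groups.length).map (fun a => (pvMappingA groups a).items)

-- ===== PORT B =====
-- m = dict(mapping); for element in group: m[element] = nf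
def pvExtendB (mapping : PySem.Dict String Int) (group : List String) (nf : Int) : PySem.Dict String Int :=
  group.foldl (fun m e => m.insert e nf) mapping

def generate_nf_permutations_alt (groups : List (List String)) (nf_values : List Int) : List (List (String × Int)) :=
  (groups.foldl
    (fun result group => result.flatMap (fun mapping => nf_values.map (pvExtendB mapping group)))
    [PySem.Dict.empty]).map (fun m => m.items)

-- ===== PRECONDITION & SPEC =====
def Spec_generate_nf_permutations (groups : List (List String)) (nf_values : List Int) (out : List (List (String × Int))) : Prop := out = generate_nf_permutations_alt groups nf_values
instance (groups : List (List String)) (nf_values : List Int) (out : List (List (String × Int))) : Decidable (Spec_generate_nf_permutations groups nf_values out) := by unfold Spec_generate_nf_permutations; infer_instance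

-- ===== CLAIM (what is proved, stated in full; the proofs are below) =====
def Claim_equal_generate_nf_permutations : Prop := ∀ (groups : List (List String)) (nf_values : List Int), Dom_generate_nf_permutations groups nf_values → Spec_generate_nf_permutations groups nf_values (generate_nf_permutations groups nf_values)

-- ===== LEMMAS AND PROOFS =====

-- building A's mapping from a start dict m, used to state the fold invariant
def pvMappingFrom (m : PySem.Dict String Int) (groups : List (List String)) (assignment : List Int) : PySem.Dict String Int :=
  (groups.zip assignment).foldl
    (fun m gv => gv.1.foldl (fun m e => m.insert e gv.2) m) m

theorem pvMappingFrom_cons (m : PySem.Dict String Int) (g : List String) (gs : List (List String)) (v : Int) (t : List Int) :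
    pvMappingFrom m (g :: gs) (v :: t) = pvMappingFrom (pvExtendB m g v) gs t := by
  simp [pvMappingFrom, pvExtendB]

-- the fold invariant: expanding any list R of partial mappings through the
-- remaining groups yields, per mapping, one result for each full assignment
theorem pvFold_inv (nf_values : List Int) :
    ∀ (groups : List (List String)) (R : List (PySem.Dict String Int)),
    groups.foldl
      (fun result group => result.flatMap (fun mapping => nf_values.map (pvExtendB mapping group))) R
    = R.flatMap (fun m => (pvProductRepeat nf_values groups.length).map (pvMappingFrom m groups)) := by
  intro groups
  induction groups with
  | nil =>
      intro R
      simp [pvProductRepeat, pvMappingFrom]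
  | cons g gs ih =>
      intro R
      simp only [List.foldl_cons, ih, List.flatMap_assoc, List.length_cons, pvProductRepeat,
        List.map_flatMap, List.flatMap_map, List.map_map]
      apply List.flatMap_congr
      intro m _
      apply List.flatMap_congr
      intro v _
      apply List.map_congr_left
      intro t _
      simp [Function.comp, pvMappingFrom_cons]

-- ===== VERDICT (by name: the statement is the Claim_ definition above) =====
theorem generate_nf_permutations_spec : Claim_equal_generate_nf_permutations := by
  intro groups nf_values _
  unfold Spec_generate_nf_permutations
  unfold generate_nf_permutations generate_nf_permutations_alt
  rw [pvFold_inv]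
  simp [pvMappingA, pvMappingFrom]
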